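-- pv_equiv track=rewrite | github.com/princekumar828/epassfromserver | EPAS/KNN.py | split_all
-- ===== SOURCE A (Python) =====
-- def contains_letter(s):
--     for char in s:
--         if char.isalpha():
--             return True
--     return False
--
-- def split_all(content):
--     tmp = ""
--     contentL = []
--     for ch in content:
--         if (ch.isalnum()):
--             tmp += ch
--         else:
--             if (tmp and contains_letter(tmp)):
--                 contentL.append(tmp)
--                 tmp = ""
--     if (tmp and contains_letter(tmp)):
--         contentL.append(tmp)
--     return contentL
-- ===== SOURCE B (Python) =====
-- def split_all(content):
--     contentL = []
--     buf = []
--     has_letter = False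
--     for ch in content:
--         if ch.isalnum():
--             buf.append(ch)
--             if ch.isalpha():
--                 has_letter = True
--         elif has_letter:
--             contentL.append("".join(buf))
--             buf = []
--             has_letter = False
--     if has_letter:
--         contentL.append("".join(buf))
--     return contentL
-- ===== Notes on version B (the rewrite author's own statement) =====
-- stated objective: alternative
-- what changed: B makes a single pass maintaining an incremental has-letter flag (set when an alphabetic char is appended), instead of A's contains_letter rescan of the accumulated token at every separator and at the end.
import Mathlib
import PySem

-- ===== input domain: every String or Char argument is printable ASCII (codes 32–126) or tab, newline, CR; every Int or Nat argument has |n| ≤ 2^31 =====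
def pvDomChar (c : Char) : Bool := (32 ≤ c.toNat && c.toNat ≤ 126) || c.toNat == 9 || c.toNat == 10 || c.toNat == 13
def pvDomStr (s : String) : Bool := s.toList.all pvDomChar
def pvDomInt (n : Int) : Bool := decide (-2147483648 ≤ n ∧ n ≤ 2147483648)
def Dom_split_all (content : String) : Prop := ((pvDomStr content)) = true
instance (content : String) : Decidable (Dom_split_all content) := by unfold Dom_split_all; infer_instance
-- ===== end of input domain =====

-- B replaces A's per-separator rescan of the token (contains_letter) by an incrementally
-- maintained has-letter flag carried through a single pass.

-- ===== PORT A =====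
def containsLetter (s : List Char) : Bool :=
  match s with
  | [] => false
  | c :: cs => if PySem.Chars.isalpha c then true else containsLetter cs

def stepA (st : List Char × List String) (ch : Char) : List Char × List String :=
  if PySem.Chars.isalnum ch then (st.1 ++ [ch], st.2)
  else if !st.1.isEmpty && containsLetter st.1 then ([], st.2 ++ [String.ofList st.1])
  else st

def split_all (content : String) : List String :=
  let st := content.toList.foldl stepA ([], [])
  if !st.1.isEmpty && containsLetter st.1 then st.2 ++ [String.ofList st.1] else st.2

-- ===== PORT B =====
def stepB (st : List Char × Bool × List String) (ch : Char) : List Char × Bool × List String :=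
  if PySem.Chars.isalnum ch then
    (st.1 ++ [ch], st.2.1 || PySem.Chars.isalpha ch, st.2.2)
  else if st.2.1 then ([], false, st.2.2 ++ [String.ofList st.1])
  else st

def split_all_alt (content : String) : List String :=
  let st := content.toList.foldl stepB ([], false, [])
  if st.2.1 then st.2.2 ++ [String.ofList st.1] else st.2.2

-- ===== PRECONDITION & SPEC =====
def Spec_split_all (content : String) (out : List String) : Prop := out = split_all_alt content
instance (content : String) (out : List String) : Decidable (Spec_split_all content out) := by unfold Spec_split_all; infer_instance

-- ===== CLAIM (what is proved, stated in full; the proofs are below) =====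
def Claim_equal_split_all : Prop := ∀ (content : String), Dom_split_all content → Spec_split_all content (split_all content)

-- ===== LEMMAS AND PROOFS =====
theorem containsLetter_append (s : List Char) (c : Char) :
    containsLetter (s ++ [c]) = (containsLetter s || PySem.Chars.isalpha c) := by
  induction s with
  | nil => simp [containsLetter]
  | cons a as ih => simp [containsLetter, ih, Bool.or_assoc]

theorem nonempty_and_contains (s : List Char) :
    (!s.isEmpty && containsLetter s) = containsLetter s := by
  cases s <;> simp [containsLetter]

theorem loop_eq (l : List Char) (tmp : List Char) (out : List String) :
    l.foldl stepB (tmp, containsLetter tmp, out)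
      = ((l.foldl stepA (tmp, out)).1, containsLetter (l.foldl stepA (tmp, out)).1,
         (l.foldl stepA (tmp, out)).2) := by
  induction l generalizing tmp out with
  | nil => simp
  | cons ch cs ih =>
    simp only [List.foldl_cons]
    by_cases h : PySem.Chars.isalnum ch = true
    · simp only [stepA, stepB, h, if_pos]
      rw [← containsLetter_append]
      exact ih (tmp ++ [ch]) out
    · simp only [stepA, stepB, h, if_neg, Bool.false_eq_true, not_false_eq_true,
        nonempty_and_contains]
      by_cases hc : containsLetter tmp = true
      · simpa [hc, containsLetter] using ih [] (out ++ [String.ofList tmp])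
      · simp only [Bool.not_eq_true] at hc
        simpa [hc] using ih tmp out

-- ===== VERDICT (by name: the statement is the Claim_ definition above) =====
theorem split_all_spec : Claim_equal_split_all := by
  intro content _
  unfold Spec_split_all split_all split_all_alt
  have h := loop_eq content.toList [] []
  simp only [containsLetter] at h
  simp [h, nonempty_and_contains]
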